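-- pv_equiv track=rewrite | github.com/VishwamAI/redteam-agent | scripts/rot13_solver.py | rot13_decrypt
-- ===== SOURCE A (Python) =====
-- def rot13_decrypt(encoded_message):
--     """
--     Decrypts a ROT13 encoded message.
--
--     Args:
--         encoded_message (str): The ROT13 encoded message.
--
--     Returns:
--         str: The decrypted message.
--     """
--     decrypted_message = []
--     for char in encoded_message:
--         if 'a' <= char <= 'z':
--             decrypted_message.append(chr((ord(char) - ord('a') + 13) % 26 + ord('a')))
--         elif 'A' <= char <= 'Z':
--             decrypted_message.append(chr((ord(char) - ord('A') + 13) % 26 + ord('A')))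
--         else:
--             decrypted_message.append(char)
--     return ''.join(decrypted_message)
-- ===== SOURCE B (Python) =====
-- def rot13_decrypt(encoded_message):
--     """
--     Decrypts a ROT13 encoded message.
--
--     Args:
--         encoded_message (str): The ROT13 encoded message.
--
--     Returns:
--         str: The decrypted message.
--     """
--     table = {}
--     for alphabet in ('abcdefghijklmnopqrstuvwxyz', 'ABCDEFGHIJKLMNOPQRSTUVWXYZ'):
--         for i, ch in enumerate(alphabet):
--             table[ch] = alphabet[(i + 13) % 26]
--     return ''.join(table.get(ch, ch) for ch in encoded_message)
-- ===== Notes on version B (the rewrite author's own statement) =====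
-- stated objective: idiomatic
-- what changed: B precomputes a 52-entry ROT13 translation table once and produces the result in one uniform table-lookup pass, replacing A's per-character case-branch-plus-modular-arithmetic decoding.
import Mathlib
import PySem

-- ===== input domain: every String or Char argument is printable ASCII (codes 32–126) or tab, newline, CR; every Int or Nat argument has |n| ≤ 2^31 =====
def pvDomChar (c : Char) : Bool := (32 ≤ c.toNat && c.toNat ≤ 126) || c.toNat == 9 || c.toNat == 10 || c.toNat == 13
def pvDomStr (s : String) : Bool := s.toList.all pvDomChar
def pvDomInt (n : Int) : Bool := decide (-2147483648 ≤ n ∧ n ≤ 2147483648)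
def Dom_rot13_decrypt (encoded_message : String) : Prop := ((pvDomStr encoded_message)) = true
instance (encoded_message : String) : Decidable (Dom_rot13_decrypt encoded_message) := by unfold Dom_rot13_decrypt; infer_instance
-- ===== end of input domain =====

-- B builds a 52-entry ROT13 translation table once and maps each character through it;
-- A decodes each character with a case branch and modular arithmetic. Same values, different structure.

-- ===== PORT A =====
-- literal transliteration of A: accumulate the decrypted characters, branching per character
def rot13_decrypt (encoded_message : String) : String :=
  String.mk
    (encoded_message.toList.foldl
      (fun acc char =>
        acc ++ [if 'a' ≤ char ∧ char ≤ 'z' then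
                  Char.ofNat ((char.toNat - 'a'.toNat + 13) % 26 + 'a'.toNat)
                else if 'A' ≤ char ∧ char ≤ 'Z' then
                  Char.ofNat ((char.toNat - 'A'.toNat + 13) % 26 + 'A'.toNat)
                else char])
      [])

-- ===== PORT B =====
-- the two alphabets B iterates over
def rot13Alphabets : List (List Char) :=
  ["abcdefghijklmnopqrstuvwxyz".toList, "ABCDEFGHIJKLMNOPQRSTUVWXYZ".toList]

-- table[ch] = alphabet[(i + 13) % 26] for each (i, ch) in enumerate(alphabet)
def rot13Table : PySem.Dict Char Char :=
  rot13Alphabets.foldl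
    (fun table alphabet =>
      (PySem.List.enumerate alphabet).foldl
        (fun table p => table.insert p.2 (PySem.List.pyGetD alphabet (PySem.Int.mod (p.1 + 13) 26) p.2))
        table)
    PySem.Dict.empty

def rot13_decrypt_alt (encoded_message : String) : String :=
  String.mk (encoded_message.toList.map (fun ch => rot13Table.getD ch ch))

-- ===== PRECONDITION & SPEC =====
def Spec_rot13_decrypt (encoded_message : String) (out : String) : Prop := out = rot13_decrypt_alt encoded_message
instance (encoded_message : String) (out : String) : Decidable (Spec_rot13_decrypt encoded_message out) := by unfold Spec_rot13_decrypt; infer_instance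

-- ===== CLAIM (what is proved, stated in full; the proofs are below) =====
def Claim_equal_rot13_decrypt : Prop := ∀ (encoded_message : String), Dom_rot13_decrypt encoded_message → Spec_rot13_decrypt encoded_message (rot13_decrypt encoded_message)

-- ===== LEMMAS AND PROOFS =====

-- A's per-character decoding, named for the proofs
def rot13CharA (char : Char) : Char :=
  if 'a' ≤ char ∧ char ≤ 'z' then Char.ofNat ((char.toNat - 'a'.toNat + 13) % 26 + 'a'.toNat)
  else if 'A' ≤ char ∧ char ≤ 'Z' then Char.ofNat ((char.toNat - 'A'.toNat + 13) % 26 + 'A'.toNat)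
  else char

-- table lookup agrees with A's branch on every ASCII code point (checked exhaustively)
set_option maxRecDepth 100000 in
theorem rot13_table_eq_fin : ∀ n : Fin 128,
    rot13Table.getD (Char.ofNat n.val) (Char.ofNat n.val) = rot13CharA (Char.ofNat n.val) := by
  decide

set_option maxRecDepth 100000 in
theorem rot13_table_eq (c : Char) (h : c.toNat < 128) :
    rot13Table.getD c c = rot13CharA c := by
  rw [← Char.ofNat_toNat c]
  exact rot13_table_eq_fin ⟨c.toNat, h⟩

theorem dom_char_lt (c : Char) (h : pvDomChar c = true) : c.toNat < 128 := by
  simp [pvDomChar] at h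
  omega

-- ===== VERDICT (by name: the statement is the Claim_ definition above) =====
theorem rot13_decrypt_spec : Claim_equal_rot13_decrypt := by
  intro s hDom
  unfold Spec_rot13_decrypt rot13_decrypt rot13_decrypt_alt
  rw [PySem.List.foldl_append_singleton_eq_map]
  refine congrArg String.mk (List.map_congr_left ?_)
  intro c hc
  have hd : pvDomChar c = true := by
    have := hDom
    unfold Dom_rot13_decrypt pvDomStr at this
    exact List.all_eq_true.mp this c hc
  exact (rot13_table_eq c (dom_char_lt c hd)).symm
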